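-- pv_equiv track=rewrite | github.com/NoyRavensary/Python-Course-Assignments | Day09/analyze.py | find_longest_gc_sequence
-- ===== SOURCE A (Python) =====
-- def find_longest_gc_sequence(sequence):
--     max_gc_length = 0
--     max_gc_seq = ""
--     current_gc_length = 0
--     current_gc_seq = ""
--
--     for base in sequence:
--         if base in ['G', 'C']:
--             current_gc_seq += base
--             current_gc_length += 1
--             if current_gc_length > max_gc_length:
--                 max_gc_length = current_gc_length
--                 max_gc_seq = current_gc_seq
--         else:
--             current_gc_seq = ""
--             current_gc_length = 0
--
--     return max_gc_seq
-- ===== SOURCE B (Python) =====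
-- def find_longest_gc_sequence(sequence):
--     best_end = 0
--     best_len = 0
--     cur = 0
--     for i, base in enumerate(sequence):
--         if base == 'G' or base == 'C':
--             cur += 1
--             if cur > best_len:
--                 best_len = cur
--                 best_end = i + 1
--         else:
--             cur = 0
--     return sequence[best_end - best_len:best_end]
-- ===== Notes on version B (the rewrite author's own statement) =====
-- stated objective: alternative
-- what changed: B tracks only the end index and length of the best run and slices the original string once at the end, instead of A's building the current and best run strings by per-character concatenation.
import Mathlib
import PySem

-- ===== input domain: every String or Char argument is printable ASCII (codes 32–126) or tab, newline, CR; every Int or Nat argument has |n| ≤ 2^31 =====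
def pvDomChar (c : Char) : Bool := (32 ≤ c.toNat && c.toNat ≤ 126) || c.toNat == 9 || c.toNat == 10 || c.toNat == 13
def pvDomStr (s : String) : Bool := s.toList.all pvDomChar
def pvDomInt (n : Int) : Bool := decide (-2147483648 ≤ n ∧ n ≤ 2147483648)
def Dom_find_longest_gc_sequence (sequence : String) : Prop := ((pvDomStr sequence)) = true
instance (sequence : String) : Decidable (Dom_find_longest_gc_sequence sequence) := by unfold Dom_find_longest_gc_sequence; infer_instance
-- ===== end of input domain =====

-- B tracks only the end index and length of the best GC run and slices the original string
-- once at the end, instead of A's building run strings by per-character concatenation.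

-- ===== PORT A =====
-- Strings are handled as their character lists (Lean's String.append is opaque to the kernel);
-- the loop carries exactly A's four state variables (max_gc_length, max_gc_seq, current_gc_length, current_gc_seq).
def pvLoopA : List Char → Int → List Char → Int → List Char → List Char
  | [], _, maxSeq, _, _ => maxSeq
  | b :: rest, maxLen, maxSeq, curLen, curSeq =>
    if b = 'G' ∨ b = 'C' then
      let curSeq' := curSeq ++ [b]
      let curLen' := curLen + 1
      if curLen' > maxLen then pvLoopA rest curLen' curSeq' curLen' curSeq'
      else pvLoopA rest maxLen maxSeq curLen' curSeq'
    else
      pvLoopA rest maxLen maxSeq 0 []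

def find_longest_gc_sequence (sequence : String) : String :=
  String.ofList (pvLoopA sequence.toList 0 [] 0 [])

-- ===== PORT B =====
-- loop state: (i from enumerate, best_end, best_len, cur); returns (best_end, best_len)
def pvLoopB : List Char → Int → Int → Int → Int → Int × Int
  | [], _, bestEnd, bestLen, _ => (bestEnd, bestLen)
  | b :: rest, i, bestEnd, bestLen, cur =>
    if b = 'G' ∨ b = 'C' then
      let cur' := cur + 1
      if cur' > bestLen then pvLoopB rest (i + 1) (i + 1) cur' cur'
      else pvLoopB rest (i + 1) bestEnd bestLen cur'
    else
      pvLoopB rest (i + 1) bestEnd bestLen 0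

def find_longest_gc_sequence_alt (sequence : String) : String :=
  let r := pvLoopB sequence.toList 0 0 0 0
  PySem.Str.slice sequence (some (r.1 - r.2)) (some r.1)

-- ===== PRECONDITION & SPEC =====
def Spec_find_longest_gc_sequence (sequence : String) (out : String) : Prop := out = find_longest_gc_sequence_alt sequence
instance (sequence : String) (out : String) : Decidable (Spec_find_longest_gc_sequence sequence out) := by unfold Spec_find_longest_gc_sequence; infer_instance

-- ===== CLAIM (what is proved, stated in full; the proofs are below) =====
def Claim_equal_find_longest_gc_sequence : Prop := ∀ (sequence : String), Dom_find_longest_gc_sequence sequence → Spec_find_longest_gc_sequence sequence (find_longest_gc_sequence sequence)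

-- ===== LEMMAS AND PROOFS =====

-- Parallel-loop invariant: after processing the prefix `pre`, A's state is determined by B's
-- numeric state (bestEnd, bestLen, cur) via slices of `pre`; both loops then agree on `rest`.
theorem pvLoop_key (rest : List Char) : ∀ (pre : List Char) (be bl cur : ℕ),
    bl ≤ be → be ≤ pre.length → cur ≤ pre.length →
    ∃ be' bl' : ℕ, bl' ≤ be' ∧ be' ≤ (pre ++ rest).length ∧
      pvLoopB rest (pre.length : Int) (be : Int) (bl : Int) (cur : Int) = ((be' : Int), (bl' : Int)) ∧
      pvLoopA rest (bl : Int) ((pre.drop (be - bl)).take bl) (cur : Int) (pre.drop (pre.length - cur))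
        = (((pre ++ rest).drop (be' - bl')).take bl') := by
  induction rest with
  | nil =>
    intro pre be bl cur hble hbe hcur
    exact ⟨be, bl, hble, by simpa using hbe, rfl, by simp [pvLoopA]⟩
  | cons b rest ih =>
    intro pre be bl cur hble hbe hcur
    have hcs : (pre.drop (pre.length - cur)).length = cur := by simp; omega
    have hdrop : (pre ++ [b]).drop (pre.length - cur) = pre.drop (pre.length - cur) ++ [b] :=
      List.drop_append_of_le_length (by omega)
    have hmslen : bl ≤ (pre.drop (be - bl)).length := by simp; omega
    have hmstake : ((pre ++ [b]).drop (be - bl)).take bl = (pre.drop (be - bl)).take bl := by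
      rw [List.drop_append_of_le_length (by omega : be - bl ≤ pre.length),
          List.take_append_of_le_length hmslen]
    by_cases hgc : b = 'G' ∨ b = 'C'
    · by_cases hgt : cur + 1 > bl
      · -- new best run, ending at index pre.length + 1
        obtain ⟨be', bl', h₁, h₂, h₃, h₄⟩ :=
          ih (pre ++ [b]) (pre.length + 1) (cur + 1) (cur + 1) (by omega) (by simp) (by simp; omega)
        refine ⟨be', bl', h₁, by simpa using h₂, ?_, ?_⟩
        · rw [pvLoopB]
          simp only [hgc, if_true]
          rw [if_pos (by exact_mod_cast hgt : (cur : Int) + 1 > (bl : Int))]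
          simp only [List.length_append, List.length_cons, List.length_nil] at h₃
          push_cast at h₃ ⊢
          exact h₃
        · rw [pvLoopA]
          simp only [hgc, if_true]
          rw [if_pos (by exact_mod_cast hgt : (cur : Int) + 1 > (bl : Int))]
          simp only [List.length_append, List.length_cons, List.length_nil, List.append_assoc,
            List.singleton_append] at h₄
          rw [show pre.length + 1 - (cur + 1) = pre.length - cur by omega, hdrop,
              List.take_of_length_le (by rw [List.length_append, hcs]; simp)] at h₄
          push_cast at h₄ ⊢
          exact h₄
      · -- best run unchanged
        obtain ⟨be', bl', h₁, h₂, h₃, h₄⟩ :=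
          ih (pre ++ [b]) be bl (cur + 1) hble (by simp; omega) (by simp; omega)
        refine ⟨be', bl', h₁, by simpa using h₂, ?_, ?_⟩
        · rw [pvLoopB]
          simp only [hgc, if_true]
          rw [if_neg (by exact_mod_cast hgt : ¬ ((cur : Int) + 1 > (bl : Int)))]
          simp only [List.length_append, List.length_cons, List.length_nil] at h₃
          push_cast at h₃ ⊢
          exact h₃
        · rw [pvLoopA]
          simp only [hgc, if_true]
          rw [if_neg (by exact_mod_cast hgt : ¬ ((cur : Int) + 1 > (bl : Int)))]
          simp only [List.length_append, List.length_cons, List.length_nil, List.append_assoc,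
            List.singleton_append] at h₄
          rw [hmstake, show pre.length + 1 - (cur + 1) = pre.length - cur by omega,
              hdrop] at h₄
          push_cast at h₄ ⊢
          exact h₄
    · -- non-GC character: reset current run
      obtain ⟨be', bl', h₁, h₂, h₃, h₄⟩ :=
        ih (pre ++ [b]) be bl 0 hble (by simp; omega) (by simp)
      refine ⟨be', bl', h₁, by simpa using h₂, ?_, ?_⟩
      · rw [pvLoopB]
        simp only [hgc, if_false]
        simp only [List.length_append, List.length_cons, List.length_nil] at h₃
        push_cast at h₃ ⊢
        exact h₃
      · rw [pvLoopA]
        simp only [hgc, if_false]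
        simp only [List.length_append, List.length_cons, List.length_nil, List.append_assoc,
          List.singleton_append] at h₄
        rw [hmstake, show pre.length + 1 - 0 = (pre ++ [b]).length by simp,
            List.drop_length] at h₄
        push_cast at h₄ ⊢
        exact h₄

-- ===== VERDICT (by name: the statement is the Claim_ definition above) =====
theorem find_longest_gc_sequence_spec : Claim_equal_find_longest_gc_sequence := by
  intro s _
  unfold Spec_find_longest_gc_sequence find_longest_gc_sequence find_longest_gc_sequence_alt
  obtain ⟨be', bl', h₁, h₂, h₃, h₄⟩ := pvLoop_key s.toList [] 0 0 0 le_rfl (by simp) (by simp)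
  simp only [List.nil_append, List.length_nil, Nat.cast_zero, List.drop_nil, List.take_nil] at h₃ h₄ h₂
  rw [h₃]
  apply String.ext
  rw [h₄]
  have hsub : ((be' : Int) - (bl' : Int)) = ((be' - bl' : ℕ) : Int) := by omega
  simp only [PySem.Str.toList_slice, PySem.Chars.slice_eq_listSlice, hsub,
    PySem.List.slice_natCast]
  rw [show be' - (be' - bl') = bl' from by omega]
  simp
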